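-- pv_equiv track=rewrite | github.com/dynamite-123/LeetCodeSolutions | Solutions/2094.py | findEvenNumbers
-- ===== SOURCE A (Python) =====
-- from typing import List
-- from collections import defaultdict
--
-- def findEvenNumbers(digits: List[int]) -> List[int]:
--     freq = [0] * 10
--     for num in digits:
--         freq[num] += 1
--
--     def good(x):
--         temp = defaultdict(int)
--         while x:
--             d = x % 10
--             x = x // 10
--             temp[d] += 1
--         for n, fq in temp.items():
--             if fq > freq[n]:
--                 return False
--         return True
--
--     res = []
--
--     for i in range(100, 1000, 2):
--         if good(i):
--             res.append(i)
--
--     return res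
-- ===== SOURCE B (Python) =====
-- def findEvenNumbers(digits):
--     cnt = [0] * 10
--     for d in digits:
--         cnt[d] += 1
--     # pool of available digits; at most 3 copies of one digit are ever useful
--     pool = []
--     for v in range(10):
--         pool.extend([v] * min(cnt[v], 3))
--     seen = set()
--     n = len(pool)
--     for i in range(n):
--         if pool[i] == 0:
--             continue
--         for j in range(n):
--             if j == i:
--                 continue
--             for k in range(n):
--                 if k == i or k == j:
--                     continue
--                 if pool[k] % 2 == 0:
--                     seen.add(100 * pool[i] + 10 * pool[j] + pool[k])
--     return sorted(seen)
-- ===== Notes on version B (the rewrite author's own statement) =====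
-- stated objective: alternative
-- what changed: A tests every even number 100..998 against a digit-frequency table; B never scans that range: from the counts it lays out a pool with at most 3 copies of each digit, enumerates ordered triples of distinct pool positions, collects 100*p[i]+10*p[j]+p[k] with p[i]!=0 and p[k] even into a set, and returns it sorted.
import Mathlib
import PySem

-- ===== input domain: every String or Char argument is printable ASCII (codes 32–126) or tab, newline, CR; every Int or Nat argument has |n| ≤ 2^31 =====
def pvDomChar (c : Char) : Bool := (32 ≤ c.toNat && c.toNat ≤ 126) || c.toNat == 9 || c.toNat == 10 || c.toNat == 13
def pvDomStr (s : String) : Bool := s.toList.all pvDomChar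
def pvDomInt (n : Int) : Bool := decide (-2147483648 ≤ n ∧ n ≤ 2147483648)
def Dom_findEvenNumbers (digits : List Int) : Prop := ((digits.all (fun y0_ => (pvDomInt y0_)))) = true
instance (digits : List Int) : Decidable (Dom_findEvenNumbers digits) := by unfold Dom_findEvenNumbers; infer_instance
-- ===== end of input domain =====

-- B replaces A's scan of the whole even range 100..998 (each candidate decomposed and checked
-- against a frequency table) by constructing the numbers from the input: it enumerates ordered
-- triples of distinct positions, collects the built values into a set and sorts it
-- (objective: alternative; return value only).

-- ===== PORT A =====
-- good()'s `while x:` digit-extraction loop; exact for x ≥ 0 (A only calls it with 100 ≤ x < 1000)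
def pvTemp (x : Int) (temp : PySem.Dict Int Int) : PySem.Dict Int Int :=
  if 0 < x then
    pvTemp (PySem.Int.floordiv x 10) (temp.modify (PySem.Int.mod x 10) 0 (· + 1))
  else temp
termination_by x.toNat
decreasing_by
  rw [PySem.Int.floordiv_eq_ediv_of_pos (by omega : (0:Int) < 10)]
  omega

-- good(x): `freq[n]` read as pyGetD with default 0 — exact here: temp's keys are digits 0..9 of x and freq has length 10
def pvGood (freq : List Int) (x : Int) : Bool :=
  (pvTemp x PySem.Dict.empty).items.all (fun p => !(decide (p.2 > PySem.List.pyGetD freq p.1 0)))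

-- `freq[num] += 1` via pyGetD/pySetD (total forms; exact under Pre_, which keeps num inside 0..9)
def findEvenNumbers (digits : List Int) : List Int :=
  let freq := digits.foldl (fun f num => PySem.List.pySetD f num (PySem.List.pyGetD f num 0 + 1)) (List.replicate 10 0)
  (PySem.List.pyRange 100 1000 2).foldl (fun res i => if pvGood freq i then res ++ [i] else res) []

-- ===== PORT B =====
-- Source B's `cnt[d] += 1` counting pass, ported exactly as A's (pySetD/pyGetD; total forms, exact
-- under Pre_, which keeps d inside -10..9 — outside it both Pythons raise IndexError alike),
-- then pool.extend([v] * min(cnt[v], 3)) over range(10)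
def pvPool (cnt : List Int) : List Int :=
  (PySem.List.pyRange 0 10 1).foldl
    (fun p v => p ++ PySem.List.pyRepeat [v] (min (PySem.List.pyGetD cnt v 0) 3)) []

-- the three nested position loops of Source B; pool[i] read as pyGetD (total form; the index is always in range)
def pvSeen (pool : List Int) : PySem.Set Int :=
  let n : Int := (pool.length : Int)
  (PySem.List.pyRange 0 n 1).foldl (fun s i =>
    if PySem.List.pyGetD pool i 0 == 0 then s else
    (PySem.List.pyRange 0 n 1).foldl (fun s j =>
      if j == i then s else
      (PySem.List.pyRange 0 n 1).foldl (fun s k =>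
        if k == i || k == j then s else
        if PySem.Int.mod (PySem.List.pyGetD pool k 0) 2 == 0 then
          PySem.Set.add s (100 * PySem.List.pyGetD pool i 0 + 10 * PySem.List.pyGetD pool j 0
            + PySem.List.pyGetD pool k 0)
        else s) s) s) (PySem.Set.empty : PySem.Set Int)

def findEvenNumbers_alt (digits : List Int) : List Int :=
  let cnt := digits.foldl (fun f d => PySem.List.pySetD f d (PySem.List.pyGetD f d 0 + 1)) (List.replicate 10 0)
  PySem.List.sorted (pvSeen (pvPool cnt)) (fun x => x)

-- ===== PRECONDITION & SPEC =====
-- Pre_ is exactly where A returns: an element outside -10..9 makes A's `freq[num]` raise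
-- IndexError (an element in -10..-1 is read through Python's negative-index wraparound as the
-- digit num % 10, which is also how B normalizes every element).
def Pre_findEvenNumbers (digits : List Int) : Prop := ∀ d ∈ digits, -10 ≤ d ∧ d ≤ 9
instance (digits : List Int) : Decidable (Pre_findEvenNumbers digits) := by unfold Pre_findEvenNumbers; infer_instance
def pvWitness_findEvenNumbers : List Int := [2, 1, 5, 0]

def Spec_findEvenNumbers (digits : List Int) (out : List Int) : Prop := out = findEvenNumbers_alt digits
instance (digits : List Int) (out : List Int) : Decidable (Spec_findEvenNumbers digits out) := by unfold Spec_findEvenNumbers; infer_instance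

-- ===== CLAIM (what is proved, stated in full; the proofs are below) =====
def Claim_equal_findEvenNumbers : Prop := ∀ (digits : List Int), Dom_findEvenNumbers digits → Pre_findEvenNumbers digits → Spec_findEvenNumbers digits (findEvenNumbers digits)

-- ===== LEMMAS AND PROOFS =====

-- digit extraction of 100a+10b+c is Counter([c, b, a])
lemma pvTemp_eq (a b c : Int) (ha : 1 ≤ a) (ha' : a ≤ 9) (hb : 0 ≤ b) (hb' : b ≤ 9)
    (hc : 0 ≤ c) (hc' : c ≤ 9) :
    pvTemp (100 * a + 10 * b + c) PySem.Dict.empty = PySem.Dict.counter [c, b, a] := by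
  have e10 : (0:Int) < 10 := by omega
  have m1 : PySem.Int.mod (100 * a + 10 * b + c) 10 = c := by
    rw [PySem.Int.mod_eq_emod_of_pos e10]; omega
  have d1 : PySem.Int.floordiv (100 * a + 10 * b + c) 10 = 10 * a + b := by
    rw [PySem.Int.floordiv_eq_ediv_of_pos e10]; omega
  have m2 : PySem.Int.mod (10 * a + b) 10 = b := by
    rw [PySem.Int.mod_eq_emod_of_pos e10]; omega
  have d2 : PySem.Int.floordiv (10 * a + b) 10 = a := by
    rw [PySem.Int.floordiv_eq_ediv_of_pos e10]; omega
  have m3 : PySem.Int.mod a 10 = a := by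
    rw [PySem.Int.mod_eq_emod_of_pos e10]; omega
  have d3 : PySem.Int.floordiv a 10 = 0 := by
    rw [PySem.Int.floordiv_eq_ediv_of_pos e10]; omega
  rw [pvTemp, if_pos (by omega : (0:Int) < 100 * a + 10 * b + c), m1, d1]
  rw [pvTemp, if_pos (by omega : (0:Int) < 10 * a + b), m2, d2]
  rw [pvTemp, if_pos (by omega : (0:Int) < a), m3, d3]
  rw [pvTemp, if_neg (by omega : ¬ (0:Int) < 0)]
  rw [PySem.Dict.counter_eq_foldl]
  simp [List.foldl]

-- list indexing at a digit position: Python's wraparound for -len ≤ i < len, written as i % 10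
lemma pv_pySetD_wrap (f : List Int) (d x : Int) (hf : f.length = 10)
    (h1 : -10 ≤ d) (h2 : d ≤ 9) :
    PySem.List.pySetD f d x = f.set (PySem.Int.mod d 10).toNat x := by
  have hm : PySem.Int.mod d 10 = d % 10 :=
    PySem.Int.mod_eq_emod_of_pos (by omega : (0:Int) < 10)
  unfold PySem.List.pySetD PySem.List.pySet? PySem.List.pyIdx?
  rw [hf, hm]
  by_cases h0 : 0 ≤ d
  · rw [if_pos h0, if_pos (by omega : d < ((10:Nat):Int))]
    have : (d % 10).toNat = d.toNat := by omega
    simp [this]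
  · rw [if_neg h0, if_pos (by omega : -((10:Nat):Int) ≤ d)]
    have : (d % 10).toNat = 10 - (-d).toNat := by omega
    simp [this]

lemma pv_pyGetD_wrap (f : List Int) (d : Int) (hf : f.length = 10)
    (h1 : -10 ≤ d) (h2 : d ≤ 9) :
    PySem.List.pyGetD f d 0 = f.getD (PySem.Int.mod d 10).toNat 0 := by
  have hm : PySem.Int.mod d 10 = d % 10 :=
    PySem.Int.mod_eq_emod_of_pos (by omega : (0:Int) < 10)
  unfold PySem.List.pyGetD PySem.List.pyGet? PySem.List.pyIdx?
  rw [hf, hm]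
  by_cases h0 : 0 ≤ d
  · rw [if_pos h0, if_pos (by omega : d < ((10:Nat):Int))]
    have : (d % 10).toNat = d.toNat := by omega
    simp [this, List.getD]
  · rw [if_neg h0, if_pos (by omega : -((10:Nat):Int) ≤ d)]
    have : (d % 10).toNat = 10 - (-d).toNat := by omega
    simp [this, List.getD]

lemma pvFreq_get (L : List Int) : ∀ (f : List Int), f.length = 10 →
    (∀ d ∈ L, -10 ≤ d ∧ d ≤ 9) → ∀ v : Int, 0 ≤ v → v ≤ 9 →
    PySem.List.pyGetD
      (L.foldl (fun f num => PySem.List.pySetD f num (PySem.List.pyGetD f num 0 + 1)) f) v 0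
      = PySem.List.pyGetD f v 0 + ((L.map (fun d => PySem.Int.mod d 10)).count v : Int) := by
  induction L with
  | nil => intro f hf hL v hv0 hv9; simp
  | cons d L ih =>
    intro f hf hL v hv0 hv9
    obtain ⟨hd1, hd2⟩ := hL d List.mem_cons_self
    have hm0 : 0 ≤ PySem.Int.mod d 10 := by
      rw [PySem.Int.mod_eq_emod_of_pos (by omega : (0:Int) < 10)]
      omega
    have hm9 : PySem.Int.mod d 10 < 10 := by
      rw [PySem.Int.mod_eq_emod_of_pos (by omega : (0:Int) < 10)]
      omega
    have hmlt : (PySem.Int.mod d 10).toNat < f.length := by omega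
    have hvlt : v.toNat < f.length := by omega
    rw [List.foldl_cons, pv_pySetD_wrap f d _ hf hd1 hd2, pv_pyGetD_wrap f d hf hd1 hd2]
    rw [ih _ (by simpa using hf) (fun e he => hL e (List.mem_cons_of_mem _ he)) v hv0 hv9]
    rw [List.map_cons, List.count_cons]
    rw [PySem.List.pyGetD_of_nonneg _ _ hv0, PySem.List.pyGetD_of_nonneg _ _ hv0]
    rw [List.getD_eq_getElem _ _ hvlt, List.getD_eq_getElem _ _ (by simpa using hvlt)]
    rw [List.getElem_set]
    by_cases hmv : PySem.Int.mod d 10 = v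
    · have ht : (PySem.Int.mod d 10).toNat = v.toNat := by omega
      rw [if_pos ht, if_pos (by simpa using hmv)]
      rw [List.getD_eq_getElem _ _ hmlt]
      rw [show f[(PySem.Int.mod d 10).toNat]'hmlt = f[v.toNat]'hvlt from by simp only [ht]]
      push_cast
      ring
    · have ht : (PySem.Int.mod d 10).toNat ≠ v.toNat := by omega
      rw [if_neg ht, if_neg (by simpa using hmv)]
      simp

-- the pool loop emits, in order, min(count, 3) copies of each digit 0..9
lemma pvPool_count_gen (cnt : List Int) (w : Int) : ∀ (R acc : List Int), R.Nodup →
    (R.foldl (fun p v => p ++ PySem.List.pyRepeat [v] (min (PySem.List.pyGetD cnt v 0) 3)) acc).count w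
    = acc.count w + (if w ∈ R then (min (PySem.List.pyGetD cnt w 0) 3).toNat else 0) := by
  intro R
  induction R with
  | nil => intro acc _; simp
  | cons v R ih =>
    intro acc hnd
    rw [List.foldl_cons, ih _ (List.nodup_cons.mp hnd).2]
    rw [List.count_append, PySem.List.pyRepeat_singleton, List.count_replicate]
    by_cases hwv : w = v
    · subst hwv
      have hnotin : w ∉ R := (List.nodup_cons.mp hnd).1
      simp [hnotin]
    · simp [List.mem_cons, hwv, Ne.symm hwv]

lemma pvPool_count (cnt : List Int) (w : Int) :
    (pvPool cnt).count w
    = if 0 ≤ w ∧ w < 10 then (min (PySem.List.pyGetD cnt w 0) 3).toNat else 0 := by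
  unfold pvPool
  rw [pvPool_count_gen cnt w (PySem.List.pyRange 0 10 1) [] (by decide)]
  by_cases h : 0 ≤ w ∧ w < 10
  · rw [if_pos (PySem.List.mem_pyRange_one.mpr h), if_pos h]
    simp
  · rw [if_neg (fun hm => h (PySem.List.mem_pyRange_one.mp hm)), if_neg h]
    simp

-- generic membership lemma for accumulator loops that only ever add elements
lemma pv_mem_foldl {α : Type} (l : List Int) (g : List α → Int → List α)
    (x : α) (Q : Int → Prop)
    (hg : ∀ s e, e ∈ l → (x ∈ g s e ↔ x ∈ s ∨ Q e)) :
    ∀ s, (x ∈ l.foldl g s ↔ x ∈ s ∨ ∃ e ∈ l, Q e) := by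
  induction l with
  | nil => simp
  | cons e l ih =>
    intro s
    rw [List.foldl_cons, ih (fun s' e' he' => hg s' e' (List.mem_cons_of_mem _ he')),
      hg s e List.mem_cons_self]
    simp only [List.mem_cons]
    constructor
    · rintro ((h | h) | ⟨e', he', hq⟩)
      · exact Or.inl h
      · exact Or.inr ⟨e, Or.inl rfl, h⟩
      · exact Or.inr ⟨e', Or.inr he', hq⟩
    · rintro (h | ⟨e', (rfl | he'), hq⟩)
      · exact Or.inl (Or.inl h)
      · exact Or.inl (Or.inr hq)
      · exact Or.inr ⟨e', he', hq⟩

-- generic nodup preservation for accumulator loops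
lemma pv_nodup_foldl {α : Type} (l : List Int) (g : List α → Int → List α)
    (hg : ∀ s e, s.Nodup → (g s e).Nodup) :
    ∀ s : List α, s.Nodup → (l.foldl g s).Nodup := by
  induction l with
  | nil => intro s hs; simpa using hs
  | cons e l ih => intro s hs; exact ih (g s e) (hg s e hs)

-- a permutation of an explicit 2-list is one of the two arrangements
lemma pv_perm2 {u v b c : Int} (h : ([b, c] : List Int).Perm [u, v]) :
    (b = u ∧ c = v) ∨ (b = v ∧ c = u) := by
  rw [List.cons_perm_iff_perm_erase] at h
  obtain ⟨hb, h⟩ := h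
  by_cases hbu : b = u
  · subst hbu
    rw [List.erase_cons_head] at h
    rw [List.perm_singleton] at h
    simp_all
  · have hbv : b = v := by rcases (by simpa using hb) with h' | h' <;> simp_all
    subst hbv
    rw [List.erase_cons_tail (by simpa using fun h' : u = b => hbu h'.symm),
      List.erase_cons_head] at h
    rw [List.perm_singleton] at h
    simp_all

-- a permutation of an explicit 3-list is one of the six arrangements
lemma pv_perm3 {x y z a b c : Int} (h : ([a, b, c] : List Int).Perm [x, y, z]) :
    (a = x ∧ b = y ∧ c = z) ∨ (a = x ∧ b = z ∧ c = y) ∨ (a = y ∧ b = x ∧ c = z) ∨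
    (a = y ∧ b = z ∧ c = x) ∨ (a = z ∧ b = x ∧ c = y) ∨ (a = z ∧ b = y ∧ c = x) := by
  rw [List.cons_perm_iff_perm_erase] at h
  obtain ⟨ha, h⟩ := h
  by_cases hax : a = x
  · subst hax
    rw [List.erase_cons_head] at h
    rcases pv_perm2 h with ⟨rfl, rfl⟩ | ⟨rfl, rfl⟩
    · exact Or.inl ⟨rfl, rfl, rfl⟩
    · exact Or.inr (Or.inl ⟨rfl, rfl, rfl⟩)
  · by_cases hay : a = y
    · subst hay
      rw [List.erase_cons_tail (by simpa using fun h' : x = a => hax h'.symm),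
        List.erase_cons_head] at h
      rcases pv_perm2 h with ⟨rfl, rfl⟩ | ⟨rfl, rfl⟩
      · exact Or.inr (Or.inr (Or.inl ⟨rfl, rfl, rfl⟩))
      · exact Or.inr (Or.inr (Or.inr (Or.inl ⟨rfl, rfl, rfl⟩)))
    · have haz : a = z := by rcases (by simpa using ha) with h' | h' | h' <;> simp_all
      subst haz
      rw [List.erase_cons_tail (by simpa using fun h' : x = a => hax h'.symm),
        List.erase_cons_tail (by simpa using fun h' : y = a => hay h'.symm),
        List.erase_cons_head] at h
      rcases pv_perm2 h with ⟨rfl, rfl⟩ | ⟨rfl, rfl⟩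
      · exact Or.inr (Or.inr (Or.inr (Or.inr (Or.inl ⟨rfl, rfl, rfl⟩))))
      · exact Or.inr (Or.inr (Or.inr (Or.inr (Or.inr ⟨rfl, rfl, rfl⟩))))

-- reading every position of a list in order gives the list back
lemma pv_map_getD_range (t : List Int) :
    (List.range t.length).map (fun m => t.getD m 0) = t := by
  apply List.ext_getElem
  · simp
  · intro n h1 h2
    simp only [List.getElem_map, List.getElem_range]
    exact List.getD_eq_getElem t 0 h2

-- distinct positions with values a, b, c give [a,b,c] as a sub-multiset
lemma pv_subperm_of_indices (t : List Int) (i j k : Nat)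
    (hi : i < t.length) (hj : j < t.length) (hk : k < t.length)
    (hij : i ≠ j) (hik : i ≠ k) (hjk : j ≠ k) :
    ([t.getD i 0, t.getD j 0, t.getD k 0] : List Int).Subperm t := by
  have hsub : ([i, j, k] : List Nat).Subperm (List.range t.length) := by
    apply List.Nodup.subperm
    · simp [hij, hik, hjk]
    · intro m hm
      rcases (by simpa using hm) with rfl | rfl | rfl <;> simp [List.mem_range, hi, hj, hk]
  obtain ⟨l, hp, hs⟩ := hsub
  refine ⟨l.map (fun m => t.getD m 0), ?_, ?_⟩
  · simpa using hp.map (fun m => t.getD m 0)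
  · have := hs.map (fun m => t.getD m 0)
    rwa [pv_map_getD_range] at this

-- and conversely: a 3-element sub-multiset sits at three distinct positions
lemma pv_indices_of_subperm (t : List Int) (a b c : Int)
    (h : ([a, b, c] : List Int).Subperm t) :
    ∃ i j k : Nat, i < t.length ∧ j < t.length ∧ k < t.length ∧
      i ≠ j ∧ i ≠ k ∧ j ≠ k ∧ t.getD i 0 = a ∧ t.getD j 0 = b ∧ t.getD k 0 = c := by
  obtain ⟨l, hp, hs⟩ := h
  have hlen : l.length = 3 := by simpa using hp.length_eq
  match l, hlen with
  | [x, y, z], _ =>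
    rw [List.sublist_iff_exists_orderEmbedding_getElem?_eq] at hs
    obtain ⟨f, hf⟩ := hs
    have h0 := hf 0
    have h1 := hf 1
    have h2 := hf 2
    simp only [List.getElem?_cons_zero, List.getElem?_cons_succ] at h0 h1 h2
    have hx : t[f 0]? = some x := h0.symm
    have hy : t[f 1]? = some y := h1.symm
    have hz : t[f 2]? = some z := h2.symm
    rw [List.getElem?_eq_some_iff] at hx hy hz
    obtain ⟨hx1, hx2⟩ := hx
    obtain ⟨hy1, hy2⟩ := hy
    obtain ⟨hz1, hz2⟩ := hz
    have h01 : f 0 < f 1 := f.strictMono (by omega)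
    have h12 : f 1 < f 2 := f.strictMono (by omega)
    have gx : t.getD (f 0) 0 = x := by rw [List.getD_eq_getElem t 0 hx1]; exact hx2
    have gy : t.getD (f 1) 0 = y := by rw [List.getD_eq_getElem t 0 hy1]; exact hy2
    have gz : t.getD (f 2) 0 = z := by rw [List.getD_eq_getElem t 0 hz1]; exact hz2
    rcases pv_perm3 hp.symm with ⟨rfl, rfl, rfl⟩ | ⟨rfl, rfl, rfl⟩ | ⟨rfl, rfl, rfl⟩ |
      ⟨rfl, rfl, rfl⟩ | ⟨rfl, rfl, rfl⟩ | ⟨rfl, rfl, rfl⟩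
    · exact ⟨f 0, f 1, f 2, hx1, hy1, hz1, by omega, by omega, by omega, gx, gy, gz⟩
    · exact ⟨f 0, f 2, f 1, hx1, hz1, hy1, by omega, by omega, by omega, gx, gz, gy⟩
    · exact ⟨f 1, f 0, f 2, hy1, hx1, hz1, by omega, by omega, by omega, gy, gx, gz⟩
    · exact ⟨f 1, f 2, f 0, hy1, hz1, hx1, by omega, by omega, by omega, gy, gz, gx⟩
    · exact ⟨f 2, f 0, f 1, hz1, hx1, hy1, by omega, by omega, by omega, gz, gx, gy⟩
    · exact ⟨f 2, f 1, f 0, hz1, hy1, hx1, by omega, by omega, by omega, gz, gy, gx⟩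

-- membership in the set built by B's three nested loops
lemma pvSeen_mem (t : List Int) (x : Int) :
    x ∈ pvSeen t ↔ ∃ i ∈ PySem.List.pyRange 0 (t.length : Int) 1,
      ¬ PySem.List.pyGetD t i 0 = 0 ∧ ∃ j ∈ PySem.List.pyRange 0 (t.length : Int) 1,
        ¬ j = i ∧ ∃ k ∈ PySem.List.pyRange 0 (t.length : Int) 1,
          ¬ (k = i ∨ k = j) ∧ PySem.Int.mod (PySem.List.pyGetD t k 0) 2 = 0 ∧
          x = 100 * PySem.List.pyGetD t i 0 + 10 * PySem.List.pyGetD t j 0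
            + PySem.List.pyGetD t k 0 := by
  unfold pvSeen
  rw [pv_mem_foldl _ _ x
    (fun i => ¬ PySem.List.pyGetD t i 0 = 0 ∧ ∃ j ∈ PySem.List.pyRange 0 (t.length : Int) 1,
      ¬ j = i ∧ ∃ k ∈ PySem.List.pyRange 0 (t.length : Int) 1,
        ¬ (k = i ∨ k = j) ∧ PySem.Int.mod (PySem.List.pyGetD t k 0) 2 = 0 ∧
        x = 100 * PySem.List.pyGetD t i 0 + 10 * PySem.List.pyGetD t j 0
          + PySem.List.pyGetD t k 0)
    ?_ PySem.Set.empty]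
  · simp [PySem.Set.empty]
  intro s i _
  by_cases hi0 : PySem.List.pyGetD t i 0 = 0
  · simp [hi0]
  rw [if_neg (by simpa using hi0)]
  rw [pv_mem_foldl _ _ x
    (fun j => ¬ j = i ∧ ∃ k ∈ PySem.List.pyRange 0 (t.length : Int) 1,
      ¬ (k = i ∨ k = j) ∧ PySem.Int.mod (PySem.List.pyGetD t k 0) 2 = 0 ∧
      x = 100 * PySem.List.pyGetD t i 0 + 10 * PySem.List.pyGetD t j 0
        + PySem.List.pyGetD t k 0)
    ?_ s]
  · simp [hi0]
  intro s' j _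
  by_cases hji : j = i
  · simp [hji]
  rw [if_neg (by simpa using hji)]
  rw [pv_mem_foldl _ _ x
    (fun k => ¬ (k = i ∨ k = j) ∧ PySem.Int.mod (PySem.List.pyGetD t k 0) 2 = 0 ∧
      x = 100 * PySem.List.pyGetD t i 0 + 10 * PySem.List.pyGetD t j 0
        + PySem.List.pyGetD t k 0)
    ?_ s']
  · simp [hji]
  intro s'' k _
  by_cases hk : k = i ∨ k = j
  · rw [if_pos (by simpa using hk)]
    simp [hk]
  rw [if_neg (by simpa using hk)]
  by_cases hm : PySem.Int.mod (PySem.List.pyGetD t k 0) 2 = 0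
  · rw [if_pos (by simpa using hm)]
    rw [PySem.Set.mem_add]
    constructor
    · rintro (h | h)
      · exact Or.inl h
      · exact Or.inr ⟨hk, hm, h⟩
    · rintro (h | ⟨-, -, h⟩)
      · exact Or.inl h
      · exact Or.inr h
  · rw [if_neg (by simpa using hm)]
    constructor
    · exact fun h => Or.inl h
    · rintro (h | ⟨-, hm2, -⟩)
      · exact h
      · exact absurd hm2 hm

-- the set built by B's loops has no duplicates
lemma pvSeen_nodup (t : List Int) : (pvSeen t).Nodup := by
  unfold pvSeen
  apply pv_nodup_foldl
  · intro s i hs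
    split
    · exact hs
    apply pv_nodup_foldl _ _ ?_ s hs
    intro s' j hs'
    split
    · exact hs'
    apply pv_nodup_foldl _ _ ?_ s' hs'
    intro s'' k hs''
    split
    · exact hs''
    split
    · exact PySem.Set.nodup_add _ _ hs''
    · exact hs''
  · simp [PySem.Set.empty]

-- ===== VERDICT (by name: the statement is the Claim_ definition above) =====
theorem findEvenNumbers_spec : Claim_equal_findEvenNumbers := by
  intro digits _ hpre
  unfold Spec_findEvenNumbers
  set freq : List Int := digits.foldl
    (fun f num => PySem.List.pySetD f num (PySem.List.pyGetD f num 0 + 1))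
    (List.replicate 10 (0 : Int)) with hfreqdef
  obtain ⟨t, htdef⟩ : ∃ t : List Int, t = pvPool freq := ⟨_, rfl⟩
  have hA : findEvenNumbers digits = (PySem.List.pyRange 100 1000 2).filter (pvGood freq) := by
    rw [findEvenNumbers]
    simp only [PySem.List.foldl_append_if_eq_filter, List.nil_append, hfreqdef]
  have hB : findEvenNumbers_alt digits
      = PySem.List.sorted (pvSeen (pvPool freq)) (fun x => x) := rfl
  rw [hA, hB, ← htdef]
  set M : List Int := digits.map (fun d => PySem.Int.mod d 10) with hMdef
  have hM9 : ∀ v ∈ M, 0 ≤ v ∧ v ≤ 9 := by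
    intro v hv
    obtain ⟨d, -, rfl⟩ := List.mem_map.mp hv
    rw [PySem.Int.mod_eq_emod_of_pos (by omega : (0:Int) < 10)]
    omega
  have hfreq : ∀ v : Int, 0 ≤ v → v ≤ 9 → PySem.List.pyGetD freq v 0 = (M.count v : Int) := by
    intro v h0 h9
    rw [hfreqdef, pvFreq_get digits _ (by simp) hpre v h0 h9,
      PySem.List.pyGetD_of_nonneg _ _ h0, List.getD_replicate _ (by omega : v.toNat < 10)]
    simp [hMdef]
  have htcount : ∀ v : Int, 0 ≤ v → v ≤ 9 → t.count v = min (M.count v) 3 := by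
    intro v h0 h9
    rw [htdef, pvPool_count, if_pos ⟨h0, by omega⟩, hfreq v h0 h9]
    omega
  have ht9 : ∀ v ∈ t, 0 ≤ v ∧ v ≤ 9 := by
    intro v hv
    have h1 : 0 < t.count v := List.count_pos_iff.mpr hv
    rw [htdef, pvPool_count] at h1
    by_contra hcon
    rw [if_neg (by omega : ¬ (0 ≤ v ∧ v < 10))] at h1
    omega
  have hgood : ∀ a b c : Int, 1 ≤ a → a ≤ 9 → 0 ≤ b → b ≤ 9 → 0 ≤ c → c ≤ 9 →
      (pvGood freq (100 * a + 10 * b + c) = true ↔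
        ∀ v ∈ ([a, b, c] : List Int), ([a, b, c].count v) ≤ M.count v) := by
    intro a b c ha ha' hb hb' hc hc'
    have hperm : ([c, b, a] : List Int).Perm [a, b, c] := by
      simpa using (List.reverse_perm [a, b, c])
    have hbnd : ∀ v ∈ ([a, b, c] : List Int), 0 ≤ v ∧ v ≤ 9 := by
      intro v hv
      rcases (by simpa using hv) with rfl | rfl | rfl <;> constructor <;> omega
    unfold pvGood
    rw [pvTemp_eq a b c ha ha' hb hb' hc hc', PySem.Dict.items_counter, List.all_map]
    simp only [List.all_eq_true, Function.comp]
    constructor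
    · intro h v hv
      have hv' : v ∈ PySem.Set.ofList ([c, b, a] : List Int) :=
        (PySem.Set.mem_ofList _ _).mpr (hperm.mem_iff.mpr hv)
      have := h v hv'
      obtain ⟨h0, h9⟩ := hbnd v hv
      rw [hfreq v h0 h9] at this
      have hcc : List.count v ([c, b, a] : List Int) = List.count v [a, b, c] :=
        hperm.count_eq v
      simp only [Bool.not_eq_eq_eq_not, Bool.not_true, decide_eq_false_iff_not, not_lt] at this
      rw [hcc] at this
      exact_mod_cast this
    · intro h v hv'
      have hv : v ∈ ([a, b, c] : List Int) :=
        hperm.mem_iff.mp ((PySem.Set.mem_ofList _ _).mp hv')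
      obtain ⟨h0, h9⟩ := hbnd v hv
      have := h v hv
      simp only [Bool.not_eq_eq_eq_not, Bool.not_true, decide_eq_false_iff_not, not_lt]
      rw [hfreq v h0 h9, hperm.count_eq v]
      exact_mod_cast this
  have gD : ∀ m : Nat, PySem.List.pyGetD t (m : Int) 0 = t.getD m 0 := by
    intro m
    rw [PySem.List.pyGetD_of_nonneg _ _ (by positivity)]
    simp
  have hmem : ∀ x : Int,
      x ∈ (PySem.List.pyRange 100 1000 2).filter (pvGood freq) ↔ x ∈ pvSeen t := by
    intro x
    rw [List.mem_filter, PySem.List.mem_pyRange_iff_of_pos (by omega : (0:Int) < 2), pvSeen_mem]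
    constructor
    · rintro ⟨⟨h100, h1000, hdvd⟩, hgx⟩
      have hx : x = 100 * (x / 100) + 10 * (x / 10 % 10) + x % 10 ∧ 1 ≤ x / 100 ∧
          x / 100 ≤ 9 ∧ 0 ≤ x / 10 % 10 ∧ x / 10 % 10 ≤ 9 ∧ 0 ≤ x % 10 ∧ x % 10 ≤ 9 ∧
          x % 10 % 2 = 0 := by omega
      obtain ⟨hxeq, ha1, ha9, hb0, hb9, hc0, hc9, hce⟩ := hx
      rw [hxeq] at hgx
      have hcnt := (hgood _ _ _ ha1 ha9 hb0 hb9 hc0 hc9).mp hgx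
      have hsubd : ([x / 100, x / 10 % 10, x % 10] : List Int).Subperm M :=
        List.subperm_ext_iff.mpr hcnt
      have hsubt : ([x / 100, x / 10 % 10, x % 10] : List Int).Subperm t := by
        rw [List.subperm_ext_iff]
        intro v hv
        have h1 := List.subperm_ext_iff.mp hsubd v hv
        have h2 : List.count v ([x / 100, x / 10 % 10, x % 10] : List Int) ≤ 3 :=
          le_trans List.count_le_length (by simp)
        have hb : 0 ≤ v ∧ v ≤ 9 := by
          rcases (by simpa using hv : v = x / 100 ∨ v = x / 10 % 10 ∨ v = x % 10) with
            rfl | rfl | rfl <;> exact ⟨by omega, by omega⟩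
        have h3 := htcount v hb.1 hb.2
        omega
      obtain ⟨i, j, k, hi, hj, hk, hij, hik, hjk, gi, gj, gk⟩ :=
        pv_indices_of_subperm t _ _ _ hsubt
      refine ⟨(i : Int), ?_, ?_, (j : Int), ?_, ?_, (k : Int), ?_, ?_, ?_, ?_⟩
      · rw [PySem.List.mem_pyRange_one]
        constructor
        · positivity
        · exact_mod_cast hi
      · rw [gD i, gi]; omega
      · rw [PySem.List.mem_pyRange_one]
        constructor
        · positivity
        · exact_mod_cast hj
      · intro h
        exact hij (by exact_mod_cast h.symm)
      · rw [PySem.List.mem_pyRange_one]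
        constructor
        · positivity
        · exact_mod_cast hk
      · rintro (h | h)
        · exact hik (by exact_mod_cast h.symm)
        · exact hjk (by exact_mod_cast h.symm)
      · rw [gD k, gk, PySem.Int.mod_eq_emod_of_pos (by omega : (0:Int) < 2)]
        omega
      · rw [gD i, gD j, gD k, gi, gj, gk]
        exact hxeq
    · rintro ⟨i', hi'm, hne0, j', hj'm, hji, k', hk'm, hkij, hmod, hxeq⟩
      rw [PySem.List.mem_pyRange_one] at hi'm hj'm hk'm
      have hval : ∀ m : Int, 0 ≤ m ∧ m < (t.length : Int) → PySem.List.pyGetD t m 0 ∈ t := by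
        rintro m ⟨h0, hlt⟩
        rw [PySem.List.pyGetD_eq_getElem t 0 h0 hlt]
        exact List.getElem_mem _
      obtain ⟨ha0, ha9⟩ := ht9 _ (hval i' hi'm)
      obtain ⟨hb0, hb9⟩ := ht9 _ (hval j' hj'm)
      obtain ⟨hc0, hc9⟩ := ht9 _ (hval k' hk'm)
      have ha1 : 1 ≤ PySem.List.pyGetD t i' 0 := by
        rcases lt_or_eq_of_le ha0 with h | h
        · omega
        · exact absurd h.symm hne0
      have hce : PySem.List.pyGetD t k' 0 % 2 = 0 := by
        rwa [PySem.Int.mod_eq_emod_of_pos (by omega : (0:Int) < 2)] at hmod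
      have hsubt : ([PySem.List.pyGetD t i' 0, PySem.List.pyGetD t j' 0,
          PySem.List.pyGetD t k' 0] : List Int).Subperm t := by
        have e1 : PySem.List.pyGetD t i' 0 = t.getD i'.toNat 0 :=
          PySem.List.pyGetD_of_nonneg _ _ hi'm.1
        have e2 : PySem.List.pyGetD t j' 0 = t.getD j'.toNat 0 :=
          PySem.List.pyGetD_of_nonneg _ _ hj'm.1
        have e3 : PySem.List.pyGetD t k' 0 = t.getD k'.toNat 0 :=
          PySem.List.pyGetD_of_nonneg _ _ hk'm.1
        rw [e1, e2, e3]
        exact pv_subperm_of_indices t i'.toNat j'.toNat k'.toNat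
          (by omega) (by omega) (by omega) (by omega) (by omega) (by omega)
      have hcnt : ∀ v ∈ ([PySem.List.pyGetD t i' 0, PySem.List.pyGetD t j' 0,
          PySem.List.pyGetD t k' 0] : List Int),
          List.count v ([PySem.List.pyGetD t i' 0, PySem.List.pyGetD t j' 0,
            PySem.List.pyGetD t k' 0] : List Int) ≤ M.count v := by
        intro v hv
        have h1 := List.subperm_ext_iff.mp hsubt v hv
        have hb : 0 ≤ v ∧ v ≤ 9 := by
          rcases (by simpa using hv : v = PySem.List.pyGetD t i' 0 ∨
              v = PySem.List.pyGetD t j' 0 ∨ v = PySem.List.pyGetD t k' 0) with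
            rfl | rfl | rfl <;> exact ⟨by omega, by omega⟩
        have h2 := htcount v hb.1 hb.2
        omega
      constructor
      · rw [hxeq]
        refine ⟨by omega, by omega, by omega⟩
      · rw [hxeq]
        exact (hgood _ _ _ ha1 ha9 hb0 hb9 hc0 hc9).mpr hcnt
  have hpairA : ((PySem.List.pyRange 100 1000 2).filter (pvGood freq)).Pairwise (· < ·) := by
    apply List.Pairwise.filter
    rw [PySem.List.pyRange_of_pos 100 1000 (by omega : (0:Int) < 2)]
    refine List.pairwise_map.mpr (List.pairwise_lt_range.imp ?_)
    intro m1 m2 h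
    omega
  have hnodupA : ((PySem.List.pyRange 100 1000 2).filter (pvGood freq)).Nodup :=
    hpairA.imp (fun h => ne_of_lt h)
  have hperm : ((PySem.List.pyRange 100 1000 2).filter (pvGood freq)).Perm (pvSeen t) :=
    (List.perm_ext_iff_of_nodup hnodupA (pvSeen_nodup t)).mpr hmem
  exact (PySem.List.sorted_eq_of_perm_of_pairwise_lt (pvSeen t) _ (fun x => x) hperm hpairA).symm
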